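-- pv_equiv track=rewrite | github.com/Haru39M/HandyKey4VR_Server | botsu/test2.py | text_to_qwerty_index
-- ===== SOURCE A (Python) =====
-- QWERTY_MAP = {
--     '0': "tgb",# 左手人差し指
--     '1': "yhn",# 右手人差し指
--     '2': "rfv",# 左手人差し指
--     '3': "ujm",# 右手人差し指
--     '4': "edc",# 左手中指
--     '5': "ik",# 右手中指 (「,」も担当範囲)
--     '6': "wsx",# 左手薬指
--     '7': "ol",# 右手薬指 (「.」も担当範囲)
--     '8': "qaz",# 左手小指
--     '9': "p",# 右手小指 (記号も担当範囲)
-- }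
--
-- def text_to_qwerty_index(text):
--     """
--     単語をQWERTYキーボードの指のインデックス（0〜7）に変換する。
--     例: "hello" -> "12555"
--     """
--     index = []
--     # 入力テキストを小文字に統一してループ
--     for char in text.lower():
--         # マップのキーと値（担当文字）でループ
--         for finger_index, letters in QWERTY_MAP.items():
--             if char in letters:
--                 index.append(finger_index)
--                 break # 文字が見つかったら内側のループを抜ける
--
--     return "".join(index)
-- ===== SOURCE B (Python) =====
-- QWERTY_MAP = {
--     '0': "tgb",
--     '1': "yhn",
--     '2': "rfv",
--     '3': "ujm",
--     '4': "edc",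
--     '5': "ik",
--     '6': "wsx",
--     '7': "ol",
--     '8': "qaz",
--     '9': "p",
-- }
--
-- # The ten groups together cover each of the 26 letters a-z exactly once, so the
-- # whole mapping collapses to a 26-slot table indexed by ord(c) - 97.
-- _slots = [""] * 26
-- for _fi, _letters in QWERTY_MAP.items():
--     for _c in _letters:
--         _slots[ord(_c) - 97] = _fi
-- TABLE = "".join(_slots)
--
--
-- def text_to_qwerty_index(text):
--     return "".join(TABLE[ord(c) - 97] for c in text.lower() if 'a' <= c <= 'z')
-- ===== Notes on version B (the rewrite author's own statement) =====
-- stated objective: faster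
-- what changed: Exploits that the ten finger groups partition the 26 lowercase letters exactly: B precomputes a 26-slot table and converts each letter by pure ord-arithmetic indexing behind a single lowercase-range test, instead of A's per-character scan over all map entries with substring membership tests and break.
import Mathlib
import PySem

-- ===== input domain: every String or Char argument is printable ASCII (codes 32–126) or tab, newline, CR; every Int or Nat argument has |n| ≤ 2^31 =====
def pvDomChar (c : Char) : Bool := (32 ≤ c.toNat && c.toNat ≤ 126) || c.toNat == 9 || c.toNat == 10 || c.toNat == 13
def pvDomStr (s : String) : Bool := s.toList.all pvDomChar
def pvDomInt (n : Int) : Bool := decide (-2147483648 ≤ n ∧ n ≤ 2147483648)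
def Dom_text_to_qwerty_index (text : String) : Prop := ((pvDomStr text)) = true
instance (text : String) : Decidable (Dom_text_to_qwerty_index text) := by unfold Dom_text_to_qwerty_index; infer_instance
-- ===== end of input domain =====

-- B exploits that the finger groups partition a-z: it indexes a precomputed 26-slot
-- table by ord(c)-97 behind one range test, instead of A's per-character scan over
-- the map's entries (objective: faster; measured).

-- ===== PORT A =====
def qwertyMap : PySem.Dict String String := PySem.Dict.ofList
  [("0", "tgb"), ("1", "yhn"), ("2", "rfv"), ("3", "ujm"), ("4", "edc"),
   ("5", "ik"), ("6", "wsx"), ("7", "ol"), ("8", "qaz"), ("9", "p")]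

-- inner 'for finger_index, letters in QWERTY_MAP.items(): if char in letters: append; break'
def pvInnerA (c : Char) : List (String × String) → List String → List String
  | [], index => index
  | (fi, letters) :: rest, index =>
      if c ∈ letters.toList then index ++ [fi] else pvInnerA c rest index

def text_to_qwerty_index (text : String) : String :=
  let index := (PySem.Str.lower text).toList.foldl
    (fun index c => pvInnerA c qwertyMap.items index) []
  PySem.Str.join "" index

-- ===== PORT B =====
-- _slots = [""]*26; for fi, letters in QWERTY_MAP.items(): for c in letters: _slots[ord(c)-97] = fi
-- TABLE = "".join(_slots)
def pvTable : String :=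
  PySem.Str.join ""
    (qwertyMap.items.foldl
      (fun slots p => p.2.toList.foldl (fun s c => s.set (c.toNat - 97) p.1) slots)
      (List.replicate 26 ""))

-- ''.join(TABLE[ord(c) - 97] for c in text.lower() if 'a' <= c <= 'z')
def text_to_qwerty_index_alt (text : String) : String :=
  PySem.Str.join ""
    ((PySem.Str.lower text).toList.filterMap
      (fun c => if 'a' ≤ c ∧ c ≤ 'z'
                then (PySem.Str.pyGet? pvTable ((c.toNat : Int) - 97)).map String.singleton
                else none))

-- ===== PRECONDITION & SPEC =====
def Spec_text_to_qwerty_index (text : String) (out : String) : Prop := out = text_to_qwerty_index_alt text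
instance (text : String) (out : String) : Decidable (Spec_text_to_qwerty_index text out) := by unfold Spec_text_to_qwerty_index; infer_instance

-- ===== CLAIM (what is proved, stated in full; the proofs are below) =====
def Claim_equal_text_to_qwerty_index : Prop := ∀ (text : String), Dom_text_to_qwerty_index text → Spec_text_to_qwerty_index text (text_to_qwerty_index text)

-- ===== LEMMAS AND PROOFS =====

-- the value A's inner break-scan appends (none = no append)
def pvScan (c : Char) : List (String × String) → Option String
  | [] => none
  | (fi, letters) :: rest => if c ∈ letters.toList then some fi else pvScan c rest

theorem pvInnerA_eq_scan (c : Char) (items : List (String × String)) (index : List String) :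
    pvInnerA c items index = index ++ (pvScan c items).toList := by
  induction items generalizing index with
  | nil => simp [pvInnerA, pvScan]
  | cons p rest ih =>
    obtain ⟨fi, letters⟩ := p
    simp only [pvInnerA, pvScan]
    split
    · simp
    · rw [ih]

-- per-character agreement of the two programs' contributions
theorem pvStep_eq (c : Char) :
    pvScan c qwertyMap.items =
      (if 'a' ≤ c ∧ c ≤ 'z'
       then (PySem.Str.pyGet? pvTable ((c.toNat : Int) - 97)).map String.singleton
       else none) := by
  by_cases h1 : c = 'a'
  · subst h1; decide
  by_cases h2 : c = 'b'
  · subst h2; decide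
  by_cases h3 : c = 'c'
  · subst h3; decide
  by_cases h4 : c = 'd'
  · subst h4; decide
  by_cases h5 : c = 'e'
  · subst h5; decide
  by_cases h6 : c = 'f'
  · subst h6; decide
  by_cases h7 : c = 'g'
  · subst h7; decide
  by_cases h8 : c = 'h'
  · subst h8; decide
  by_cases h9 : c = 'i'
  · subst h9; decide
  by_cases h10 : c = 'j'
  · subst h10; decide
  by_cases h11 : c = 'k'
  · subst h11; decide
  by_cases h12 : c = 'l'
  · subst h12; decide
  by_cases h13 : c = 'm'
  · subst h13; decide
  by_cases h14 : c = 'n'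
  · subst h14; decide
  by_cases h15 : c = 'o'
  · subst h15; decide
  by_cases h16 : c = 'p'
  · subst h16; decide
  by_cases h17 : c = 'q'
  · subst h17; decide
  by_cases h18 : c = 'r'
  · subst h18; decide
  by_cases h19 : c = 's'
  · subst h19; decide
  by_cases h20 : c = 't'
  · subst h20; decide
  by_cases h21 : c = 'u'
  · subst h21; decide
  by_cases h22 : c = 'v'
  · subst h22; decide
  by_cases h23 : c = 'w'
  · subst h23; decide
  by_cases h24 : c = 'x'
  · subst h24; decide
  by_cases h25 : c = 'y'
  · subst h25; decide
  by_cases h26 : c = 'z'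
  · subst h26; decide
  rw [if_neg ?_]
  · simp only [pvScan, show qwertyMap.items =
      [("0", "tgb"), ("1", "yhn"), ("2", "rfv"), ("3", "ujm"), ("4", "edc"),
       ("5", "ik"), ("6", "wsx"), ("7", "ol"), ("8", "qaz"), ("9", "p")] from rfl,
      show ("tgb" : String).toList = ['t','g','b'] from rfl,
      show ("yhn" : String).toList = ['y','h','n'] from rfl,
      show ("rfv" : String).toList = ['r','f','v'] from rfl,
      show ("ujm" : String).toList = ['u','j','m'] from rfl,
      show ("edc" : String).toList = ['e','d','c'] from rfl,
      show ("ik" : String).toList = ['i','k'] from rfl,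
      show ("wsx" : String).toList = ['w','s','x'] from rfl,
      show ("ol" : String).toList = ['o','l'] from rfl,
      show ("qaz" : String).toList = ['q','a','z'] from rfl,
      show ("p" : String).toList = ['p'] from rfl]
    simp [List.mem_cons, h1, h2, h3, h4, h5, h6, h7, h8, h9, h10, h11, h12, h13, h14, h15, h16, h17, h18, h19, h20, h21, h22, h23, h24, h25, h26]
  · rintro ⟨hl, hr⟩
    have hl' : 97 ≤ c.toNat := hl
    have hr' : c.toNat ≤ 122 := hr
    have hc := (Char.ofNat_toNat c).symm
    interval_cases hn : c.toNat <;> simp_all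

-- ===== VERDICT (by name: the statement is the Claim_ definition above) =====
theorem text_to_qwerty_index_spec : Claim_equal_text_to_qwerty_index := by
  intro text _
  unfold Spec_text_to_qwerty_index text_to_qwerty_index text_to_qwerty_index_alt
  simp only [pvInnerA_eq_scan, pvStep_eq, PySem.List.foldl_append_eq_flatMap,
    List.filterMap_eq_flatMap_toList, List.nil_append]
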